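-- pv_equiv track=rewrite | github.com/DA-testa/convert-array-into-heap-JurisKokins | build_heap.py | min_heapify
-- ===== SOURCE A (Python) =====
-- def min_heapify(array, i):
--     l = 2 * i + 1
--     r = 2 * i + 2
--     smallest = i
--     swaps = []
--
--     if l < len(array) and array[l] < array[smallest]:
--         smallest = l
--     if r < len(array) and array[r] < array[smallest]:
--         smallest = r
--
--     if smallest != i:
--         array[i], array[smallest] = array[smallest], array[i]
--         swaps.append((i, smallest))
--         swaps += min_heapify(array, smallest)
--
--     return swaps
-- ===== SOURCE B (Python) =====
-- def min_heapify(array, i):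
--     # "Hole" sift-down: lift out the sifted value once, move smaller children up
--     # into the hole, and write the value back at the end (same swap list as the
--     # swap-based version, one array write per level instead of two).
--     swaps = []
--     n = len(array)
--     if i < n:
--         v = array[i]
--         while True:
--             l = 2 * i + 1
--             r = 2 * i + 2
--             c = i
--             cv = v
--             if l < n and array[l] < cv:
--                 c, cv = l, array[l]
--             if r < n and array[r] < cv:
--                 c, cv = r, array[r]
--             if c == i:
--                 break
--             array[i] = cv
--             swaps.append((i, c))
--             i = c
--         array[i] = v
--     return swaps
-- ===== Notes on version B (the rewrite author's own statement) =====
-- stated objective: alternative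
-- what changed: Replaced A's swap-based recursion (two array writes and a list concatenation per level) with an iterative 'hole' sift-down that lifts the sifted value out once, moves smaller children up into the hole with one write per level, and writes the value back at the end, accumulating the same swap pairs in a loop.
-- outside the precondition, e.g. on min_heapify([2, 1], -1): A returns [], B returns []
import Mathlib
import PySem

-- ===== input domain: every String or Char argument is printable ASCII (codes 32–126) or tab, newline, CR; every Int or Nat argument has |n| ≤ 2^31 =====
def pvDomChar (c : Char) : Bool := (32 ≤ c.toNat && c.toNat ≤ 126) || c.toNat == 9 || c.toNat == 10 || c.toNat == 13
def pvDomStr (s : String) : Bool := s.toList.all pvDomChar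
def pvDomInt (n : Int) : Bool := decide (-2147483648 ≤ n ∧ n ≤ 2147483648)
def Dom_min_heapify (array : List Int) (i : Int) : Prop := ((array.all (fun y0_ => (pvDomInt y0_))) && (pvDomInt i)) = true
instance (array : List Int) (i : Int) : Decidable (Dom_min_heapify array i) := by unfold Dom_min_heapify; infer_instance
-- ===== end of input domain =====

-- B replaces A's swap-based recursion with an iterative "hole" sift-down (lift the value out, move
-- children up, write it back once); same swap list. Both Pythons mutate `array` in place identically;
-- the equivalence proved here is about the RETURN value.

-- ===== PORT A =====
-- Recursive swap-based sift-down, fuel-guarded to make the recursion total; on Pre_ inputs the swap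
-- chain has strictly increasing indices < length, so fuel `array.length + 1` never runs out.
def heapStepA : Nat → List Int → Int → (List Int × List (Int × Int))
  | 0, arr, _ => (arr, [])
  | fuel + 1, arr, i =>
    let l := 2 * i + 1
    let r := 2 * i + 2
    let n : Int := arr.length
    let s1 := if l < n ∧ PySem.List.pyGetD arr l 0 < PySem.List.pyGetD arr i 0 then l else i
    let s2 := if r < n ∧ PySem.List.pyGetD arr r 0 < PySem.List.pyGetD arr s1 0 then r else s1
    if s2 ≠ i then
      let ai := PySem.List.pyGetD arr i 0
      let as_ := PySem.List.pyGetD arr s2 0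
      let arr' := PySem.List.pySetD (PySem.List.pySetD arr i as_) s2 ai
      let rest := heapStepA fuel arr' s2
      (rest.1, (i, s2) :: rest.2)
    else (arr, [])

def min_heapify (array : List Int) (i : Int) : List (Int × Int) :=
  (heapStepA (array.length + 1) array i).2

-- ===== PORT B =====
-- Iterative hole loop: carries the lifted value v and the candidate (index, value) pairs; one array
-- write (move child up) per level, swap accumulator built front-to-back.  Returns (array, i, swaps);
-- the caller performs the final `array[i] = v` write (which does not affect the returned swaps).
def holeLoopB : Nat → List Int → Int → Int → List (Int × Int) → (List Int × Int × List (Int × Int))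
  | 0, arr, i, _, swaps => (arr, i, swaps)
  | fuel + 1, arr, i, v, swaps =>
    let l := 2 * i + 1
    let r := 2 * i + 2
    let n : Int := arr.length
    let p1 := if l < n ∧ PySem.List.pyGetD arr l 0 < v then (l, PySem.List.pyGetD arr l 0) else (i, v)
    let p2 := if r < n ∧ PySem.List.pyGetD arr r 0 < p1.2 then (r, PySem.List.pyGetD arr r 0) else p1
    if p2.1 = i then (arr, i, swaps)
    else holeLoopB fuel (PySem.List.pySetD arr i p2.2) p2.1 v (swaps ++ [(i, p2.1)])

def min_heapify_alt (array : List Int) (i : Int) : List (Int × Int) :=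
  if i < (array.length : Int) then
    let res := holeLoopB (array.length + 1) array i (PySem.List.pyGetD array i 0) []
    -- final write array[res.2.1] := v mutates the array only; the return value is the swap list
    res.2.2
  else []

-- ===== PRECONDITION & SPEC =====
-- Pre_ restricts to nonnegative heap indices, the function's natural domain: for negative i Python's
-- negative-index wraparound makes A's recursion either raise IndexError or return a value by accident
-- of wraparound (B behaves identically there in Python, but the ports do not model negative indexing).
def Pre_min_heapify (_array : List Int) (i : Int) : Prop := 0 ≤ i
instance (array : List Int) (i : Int) : Decidable (Pre_min_heapify array i) := by unfold Pre_min_heapify; infer_instance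
def pvWitness_min_heapify : List Int × Int := ([5, 2, 4, 1, 3], 0)
def Spec_min_heapify (array : List Int) (i : Int) (out : List (Int × Int)) : Prop := out = min_heapify_alt array i
instance (array : List Int) (i : Int) (out : List (Int × Int)) : Decidable (Spec_min_heapify array i out) := by unfold Spec_min_heapify; infer_instance

-- ===== CLAIM (what is proved, stated in full; the proofs are below) =====
def Claim_equal_min_heapify : Prop := ∀ (array : List Int) (i : Int), Dom_min_heapify array i → Pre_min_heapify array i → Spec_min_heapify array i (min_heapify array i)

-- ===== LEMMAS AND PROOFS =====

theorem getD_setD_int (xs : List Int) (i j v d : Int) (hi : 0 ≤ i) (hil : i < (xs.length : Int)) (hj : 0 ≤ j) :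
    PySem.List.pyGetD (PySem.List.pySetD xs i v) j d = if j = i then v else PySem.List.pyGetD xs j d := by
  obtain ⟨n, rfl⟩ := Int.eq_ofNat_of_zero_le hi
  obtain ⟨m, rfl⟩ := Int.eq_ofNat_of_zero_le hj
  rw [PySem.List.pyGetD_pySetD_natCast xs n m v d (by exact_mod_cast hil)]
  by_cases hmn : m = n <;> simp [hmn]

theorem setD_setD_int (xs : List Int) (i u v : Int) (hi : 0 ≤ i) :
    PySem.List.pySetD (PySem.List.pySetD xs i u) i v = PySem.List.pySetD xs i v := by
  rw [PySem.List.pySetD_of_nonneg _ _ hi, PySem.List.pySetD_of_nonneg _ _ hi,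
      PySem.List.pySetD_of_nonneg _ _ hi, List.set_set]

theorem setD_getD_self (xs : List Int) (i : Int) (hi : 0 ≤ i) (hil : i < (xs.length : Int)) :
    PySem.List.pySetD xs i (PySem.List.pyGetD xs i 0) = xs := by
  obtain ⟨n, rfl⟩ := Int.eq_ofNat_of_zero_le hi
  have hn : n < xs.length := by exact_mod_cast hil
  simp [PySem.List.pySetD_natCast, PySem.List.pyGetD_natCast, List.getD,
    List.getElem?_eq_getElem hn, List.set_getElem_self]

-- Core invariant: A run on B's array with v written back into the hole yields B's swap list
-- (B's array is A's array with the stale value still sitting at the current hole index i).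
theorem holeLoopB_eq (fuel : Nat) :
    ∀ (arr : List Int) (i v : Int) (swaps : List (Int × Int)), 0 ≤ i → i < (arr.length : Int) →
      (holeLoopB fuel arr i v swaps).2.2
        = swaps ++ (heapStepA fuel (PySem.List.pySetD arr i v) i).2 := by
  induction fuel with
  | zero => intro arr i v swaps _ _; simp [holeLoopB, heapStepA]
  | succ fuel ih =>
    intro arr i v swaps hi hil
    have hlen : ((PySem.List.pySetD arr i v).length : Int) = (arr.length : Int) := by
      simp [PySem.List.length_pySetD]
    have hgi : PySem.List.pyGetD (PySem.List.pySetD arr i v) i 0 = v := by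
      simp [getD_setD_int arr i i v 0 hi hil hi]
    have hgl : PySem.List.pyGetD (PySem.List.pySetD arr i v) (2 * i + 1) 0
        = PySem.List.pyGetD arr (2 * i + 1) 0 := by
      rw [getD_setD_int arr i (2 * i + 1) v 0 hi hil (by omega)]
      simp [show (2 * i + 1 : Int) ≠ i by omega]
    have hgr : PySem.List.pyGetD (PySem.List.pySetD arr i v) (2 * i + 2) 0
        = PySem.List.pyGetD arr (2 * i + 2) 0 := by
      rw [getD_setD_int arr i (2 * i + 2) v 0 hi hil (by omega)]
      simp [show (2 * i + 2 : Int) ≠ i by omega]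
    have hss : ∀ u w : Int, PySem.List.pySetD (PySem.List.pySetD arr i u) i w
        = PySem.List.pySetD arr i w := fun u w => setD_setD_int arr i u w hi
    have e1 : (2 * i + 1 : Int) ≠ i := by omega
    have e2 : (2 * i + 2 : Int) ≠ i := by omega
    by_cases h1 : 2 * i + 1 < (arr.length : Int) ∧ PySem.List.pyGetD arr (2 * i + 1) 0 < v
    · by_cases h2 : 2 * i + 2 < (arr.length : Int) ∧
          PySem.List.pyGetD arr (2 * i + 2) 0 < PySem.List.pyGetD arr (2 * i + 1) 0
      · -- descend to the right child
        simp only [holeLoopB, heapStepA, hlen, hgi, hgl, hgr]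
        simp [h1.1, h1.2, h2.1, h2.2, e2, hgl, hgr, hss]
        rw [ih (PySem.List.pySetD arr i (PySem.List.pyGetD arr (2 * i + 2) 0)) (2 * i + 2) v
            (swaps ++ [(i, 2 * i + 2)]) (by omega) (by rw [PySem.List.length_pySetD]; exact h2.1)]
        simp
      · -- descend to the left child
        simp only [holeLoopB, heapStepA, hlen, hgi, hgl, hgr]
        simp [h1.1, h1.2, h2, e1, hgl, hss]
        rw [ih (PySem.List.pySetD arr i (PySem.List.pyGetD arr (2 * i + 1) 0)) (2 * i + 1) v
            (swaps ++ [(i, 2 * i + 1)]) (by omega) (by rw [PySem.List.length_pySetD]; exact h1.1)]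
        simp
    · by_cases h2 : 2 * i + 2 < (arr.length : Int) ∧ PySem.List.pyGetD arr (2 * i + 2) 0 < v
      · -- descend to the right child
        simp only [holeLoopB, heapStepA, hlen, hgi, hgl, hgr]
        simp [h1, h2.1, h2.2, e2, hgr, hgi, hss]
        rw [ih (PySem.List.pySetD arr i (PySem.List.pyGetD arr (2 * i + 2) 0)) (2 * i + 2) v
            (swaps ++ [(i, 2 * i + 2)]) (by omega) (by rw [PySem.List.length_pySetD]; exact h2.1)]
        simp
      · -- no smaller child: both stop
        simp [holeLoopB, heapStepA, hgi, hgl, hgr, h1, h2]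

-- ===== VERDICT (by name: the statement is the Claim_ definition above) =====
theorem min_heapify_spec : Claim_equal_min_heapify := by
  intro array i _ hpre
  unfold Spec_min_heapify min_heapify min_heapify_alt
  by_cases hlt : i < (array.length : Int)
  · rw [if_pos hlt]
    have h := holeLoopB_eq (array.length + 1) array i (PySem.List.pyGetD array i 0) [] hpre hlt
    rw [setD_getD_self array i hpre hlt] at h
    simpa using h.symm
  · rw [if_neg hlt]
    have hn0 : (array.length : Int) ≤ i := le_of_not_gt hlt
    simp only [heapStepA]
    have h1 : ¬ (2 * i + 1 < (array.length : Int)) := by omega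
    have h2 : ¬ (2 * i + 2 < (array.length : Int)) := by omega
    simp [h1, h2]
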